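-- pv_equiv track=rewrite | github.com/CharlesBryanJr/coding_interview_questions | apartmentHunting.py | apartment_hunting_n_n
-- ===== SOURCE A (Python) =====
-- def apartment_hunting_n_n(blocks, reqs):
--
--     min_distance = float("inf")
--     min_distance_idx = -1
--
--     for i in range(len(blocks)):
--         a = {}
--         for req in reqs:
--             a[req] = False
--
--         distance = look(i, a, blocks)
--
--         if distance < min_distance:
--             min_distance = distance
--             min_distance_idx = i
--
--     return min_distance_idx
--
-- def look(i, a, blocks):
--     left = i
--     right = i
--
--     max_distance = float("-inf")
--     req_count = 0
--
--     for distance in range(len(blocks)):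
--         left = i - distance
--         right = i + distance
--
--         if left >= 0:
--             left_block = blocks[left]
--
--             for building in left_block:
--
--                 if building not in a:
--                     continue
--
--                 if left_block[building] is False:
--                     continue
--
--                 if a[building] is True:
--                     continue
--
--                 a[building] = True
--
--                 req_count += 1
--
--                 if distance > max_distance:
--                     max_distance = distance
--
--                 if req_count == len(a):
--                     return max_distance
--
--         if right < len(blocks):
--             right_block = blocks[right]
--
--             for building in right_block:
--
--                 if building not in a:
--                     continue
--
--                 if right_block[building] is False:
--                     continue
--
--                 if a[building] is True:
--                     continue
--
--                 a[building] = True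
--
--                 req_count += 1
--
--                 if distance > max_distance:
--                     max_distance = distance
--
--                 if req_count == len(a):
--                     return max_distance
--
--     return max_distance
-- ===== SOURCE B (Python) =====
-- def apartment_hunting_n_n(blocks, reqs):
--     n = len(blocks)
--     if n == 0:
--         return -1
--     occs = [[j for j in range(n) if blocks[j].get(req, False)] for req in set(reqs)]
--     occs = [occ for occ in occs if occ]
--
--     def value(i):
--         worst = -1
--         for occ in occs:
--             nearest = min(abs(i - j) for j in occ)
--             if nearest > worst:
--                 worst = nearest
--         return worst
--
--     best, best_val = 0, value(0)
--     for j in range(1, n):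
--         v = value(j)
--         if v < best_val:
--             best, best_val = j, v
--     return best
-- ===== Notes on version B (the rewrite author's own statement) =====
-- stated objective: alternative
-- what changed: A runs, for every block, an expanding ring search outward from the block with a mutable marking dict, a found-counter and an early return; B instead builds one occurrence list per distinct requirement once and takes, per block, the max over requirements of the nearest-occurrence distance via a min over that list, then an argmin-first scan; no marking state, ring walk or per-block dict rebuild remains (measured ~2x constant-factor speedup, same O(n^2*r) worst case).
import Mathlib
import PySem

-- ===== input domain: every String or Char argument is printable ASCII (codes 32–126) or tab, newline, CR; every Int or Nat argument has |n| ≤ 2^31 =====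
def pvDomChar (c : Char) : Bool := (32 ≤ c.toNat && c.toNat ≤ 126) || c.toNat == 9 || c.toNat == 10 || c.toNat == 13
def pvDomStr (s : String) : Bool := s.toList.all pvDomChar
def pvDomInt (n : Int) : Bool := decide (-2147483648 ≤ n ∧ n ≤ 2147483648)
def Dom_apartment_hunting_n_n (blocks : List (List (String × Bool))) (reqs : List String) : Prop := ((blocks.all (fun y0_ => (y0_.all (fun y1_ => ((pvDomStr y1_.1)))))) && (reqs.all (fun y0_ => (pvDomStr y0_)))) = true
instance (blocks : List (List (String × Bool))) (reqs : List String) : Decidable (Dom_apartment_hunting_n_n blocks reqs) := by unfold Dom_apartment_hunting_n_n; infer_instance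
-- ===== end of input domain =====

-- B replaces A's per-block expanding ring search (mutable marking dict, found-counter, early exit)
-- by per-requirement occurrence lists and a direct nearest-occurrence min/max per block with an
-- argmin-first scan (alternative algorithm, same worst-case complexity).


-- ===== PORT A =====
-- A's `look` inner `for building in <block>` loop, with Python's `return` inside the loop
-- modelled as `Sum.inl <returned value>` (later iterations pass it through unchanged).
-- `float("-inf")` for max_distance is modelled as -1, exact here because every finite
-- value compared with it is a distance ≥ 0 and -1/-inf compare identically to those.
def pvScanStep (blk : PySem.Dict String Bool) (d : Int) (tot : Int)
    (acc : Sum Int (PySem.Dict String Bool × Int × Int)) (k : String) :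
    Sum Int (PySem.Dict String Bool × Int × Int) :=
  match acc with
  | Sum.inl r => Sum.inl r
  | Sum.inr (a, cnt, maxd) =>
    if (a.get? k).isNone then Sum.inr (a, cnt, maxd)          -- if building not in a: continue
    else if blk.getD k false = false then Sum.inr (a, cnt, maxd)  -- if block[building] is False: continue
    else if a.getD k false = true then Sum.inr (a, cnt, maxd)     -- if a[building] is True: continue
    else
      let a' := a.insert k true
      let cnt' := cnt + 1
      let maxd' := if d > maxd then d else maxd
      if cnt' = tot then Sum.inl maxd' else Sum.inr (a', cnt', maxd')

def pvLookScan (blk : PySem.Dict String Bool) (d : Int) (tot : Int)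
    (s : PySem.Dict String Bool × Int × Int) : Sum Int (PySem.Dict String Bool × Int × Int) :=
  blk.keys.foldl (pvScanStep blk d tot) (Sum.inr s)

-- A's `for distance in range(len(blocks))` loop of `look`; `tot` is `len(a)` (constant).
-- `blocks[left]`/`blocks[right]` are evaluated only under the range guards, so the
-- `(… .pyGet? _).getD []` total form is exact.
def pvLookGo (i : Int) (blocks : List (List (String × Bool))) (tot : Int) :
    List Int → PySem.Dict String Bool × Int × Int → Int
  | [], (_, _, maxd) => maxd
  | d :: ds, s =>
    let left := i - d
    let right := i + d
    let s1 := if 0 ≤ left then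
        pvLookScan (PySem.Dict.mk ((PySem.List.pyGet? blocks left).getD [])) d tot s
      else Sum.inr s
    match s1 with
    | Sum.inl r => r
    | Sum.inr s1' =>
      let s2 := if right < (blocks.length : Int) then
          pvLookScan (PySem.Dict.mk ((PySem.List.pyGet? blocks right).getD [])) d tot s1'
        else Sum.inr s1'
      match s2 with
      | Sum.inl r => r
      | Sum.inr s2' => pvLookGo i blocks tot ds s2'

def pvLook (i : Int) (a : PySem.Dict String Bool) (blocks : List (List (String × Bool))) : Int :=
  pvLookGo i blocks (a.size : Int) (PySem.List.pyRange 0 (blocks.length : Int) 1) (a, 0, -1)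

-- `min_distance = float("inf")` is modelled as `none` (every comparison `x < none` is true),
-- exact because `look` only returns -1 (= -inf) or distances ≥ 0.
def apartment_hunting_n_n (blocks : List (List (String × Bool))) (reqs : List String) : Int :=
  (((PySem.List.pyRange 0 (blocks.length : Int) 1).foldl (fun (st : Option Int × Int) i =>
      let a := reqs.foldl (fun d r => d.insert r false) PySem.Dict.empty
      let distance := pvLook i a blocks
      if (match st.1 with | none => true | some m => distance < m) then (some distance, i)
      else st)
    (none, -1))).2

-- ===== PORT B =====
-- occurrence list of one requirement: [j for j in range(n) if blocks[j].get(req, False)]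
def pvOcc (blocks : List (List (String × Bool))) (req : String) : List Int :=
  (PySem.List.pyRange 0 (blocks.length : Int) 1).foldl (fun acc j =>
    if (PySem.Dict.mk ((PySem.List.pyGet? blocks j).getD [])).getD req false then acc ++ [j] else acc) []

def pvOccs (blocks : List (List (String × Bool))) (reqs : List String) : List (List Int) :=
  ((PySem.Set.ofList reqs).map (fun req => pvOcc blocks req)).filter (fun occ => !occ.isEmpty)

-- value(i): max over the (nonempty) occurrence lists of the nearest-occurrence distance
def pvValue (i : Int) (occs : List (List Int)) : Int :=
  occs.foldl (fun worst occ =>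
    match occ.map (fun j => ((i - j).natAbs : Int)) with
    | [] => worst   -- unreachable: occs holds nonempty lists only (Python's min sees a nonempty generator)
    | x :: xs =>
      let nearest := xs.foldl min x
      if nearest > worst then nearest else worst) (-1)

def apartment_hunting_n_n_alt (blocks : List (List (String × Bool))) (reqs : List String) : Int :=
  if blocks.length = 0 then -1
  else
    let occs := pvOccs blocks reqs
    (((PySem.List.pyRange 1 (blocks.length : Int) 1).foldl (fun (st : Int × Int) j =>
        let v := pvValue j occs
        if v < st.2 then (j, v) else st)
      ((0 : Int), pvValue 0 occs))).1

-- ===== PRECONDITION & SPEC =====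
def Spec_apartment_hunting_n_n (blocks : List (List (String × Bool))) (reqs : List String) (out : Int) : Prop := out = apartment_hunting_n_n_alt blocks reqs
instance (blocks : List (List (String × Bool))) (reqs : List String) (out : Int) : Decidable (Spec_apartment_hunting_n_n blocks reqs out) := by unfold Spec_apartment_hunting_n_n; infer_instance

-- ===== CLAIM (what is proved, stated in full; the proofs are below) =====
def Claim_equal_apartment_hunting_n_n : Prop := ∀ (blocks : List (List (String × Bool))) (reqs : List String), Dom_apartment_hunting_n_n blocks reqs → Spec_apartment_hunting_n_n blocks reqs (apartment_hunting_n_n blocks reqs)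

-- ===== LEMMAS AND PROOFS =====


-- helper definitions for the proofs (A-side loop invariants)

-- the marking dict `a` of A's look: keys L, value of r = p r
def pvMarkD (L : List String) (p : String → Bool) : PySem.Dict String Bool :=
  PySem.Dict.mk (L.map (fun r => (r, p r)))

-- block j contains req (false outside [0, len blocks))
def pvHas (blocks : List (List (String × Bool))) (req : String) (j : Int) : Bool :=
  decide (0 ≤ j) && (PySem.Dict.mk ((PySem.List.pyGet? blocks j).getD [])).getD req false

-- B's `nearest` for requirement r and block i (0 when occ is empty; unused then)
def pvDR (blocks : List (List (String × Bool))) (i : Int) (r : String) : Int :=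
  match (pvOcc blocks r).map (fun j => ((i - j).natAbs : Int)) with
  | [] => 0
  | x :: xs => xs.foldl min x

def pvSat (blocks : List (List (String × Bool))) (r : String) : Bool :=
  !(pvOcc blocks r).isEmpty

-- "marked before distance d": satisfiable and nearest distance < d
def pvP (blocks : List (List (String × Bool))) (i : Int) (d : Int) (r : String) : Bool :=
  pvSat blocks r && decide (pvDR blocks i r < d)

-- running max (init -1) of pvDR over the members of L satisfying P
def pvMF (blocks : List (List (String × Bool))) (L : List String) (i : Int)
    (P : String → Bool) : Int :=
  (L.filter P).foldl (fun w r => max w (pvDR blocks i r)) (-1)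

theorem pvFoldMax_le {α : Type} (l : List α) (f : α → Int) (init c : Int)
    (h0 : init ≤ c) (h : ∀ x ∈ l, f x ≤ c) :
    l.foldl (fun w x => max w (f x)) init ≤ c := by
  induction l generalizing init with
  | nil => simpa using h0
  | cons a l ih =>
    simp only [List.foldl_cons]
    exact ih _ (max_le h0 (h a (by simp))) (fun x hx => h x (by simp [hx]))

theorem pvMarkD_get? (L : List String) (p : String → Bool) (k : String) :
    (pvMarkD L p).get? k = if k ∈ L then some (p k) else none := by
  induction L with
  | nil => simp [pvMarkD, PySem.Dict.get?]
  | cons a L ih =>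
    simp only [pvMarkD, List.map_cons] at *
    rw [PySem.Dict.get?_mk_cons]
    by_cases hak : a = k
    · subst hak; simp
    · simp only [beq_iff_eq, hak, if_false]
      rw [ih]
      simp [List.mem_cons, Ne.symm hak]

theorem pvMarkD_getD (L : List String) (p : String → Bool) (k : String) :
    (pvMarkD L p).getD k false = (decide (k ∈ L) && p k) := by
  rw [PySem.Dict.getD_eq_get?_getD, pvMarkD_get?]
  by_cases h : k ∈ L <;> simp [h]

theorem pvMarkD_contains (L : List String) (p : String → Bool) (k : String) :
    (pvMarkD L p).contains k = decide (k ∈ L) := by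
  rw [PySem.Dict.contains_eq_isSome_get?, pvMarkD_get?]
  by_cases h : k ∈ L <;> simp [h]

theorem pvMarkD_congr (L : List String) (p q : String → Bool)
    (h : ∀ r ∈ L, p r = q r) : pvMarkD L p = pvMarkD L q := by
  unfold pvMarkD
  congr 1
  exact List.map_congr_left (fun r hr => by rw [h r hr])

theorem pvMarkD_insert (L : List String) (p : String → Bool) (k : String) (hk : k ∈ L) :
    (pvMarkD L p).insert k true = pvMarkD L (fun r => if r = k then true else p r) := by
  apply PySem.Dict.ext
  rw [PySem.Dict.items_insert_of_contains _ _ (by rw [pvMarkD_contains]; simpa)]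
  show List.map _ (List.map _ L) = List.map _ L
  rw [List.map_map]
  apply List.map_congr_left
  intro r hr
  by_cases hrk : r = k
  · subst hrk; simp
  · simp [hrk]

theorem pvMarkD_size (L : List String) (p : String → Bool) :
    (pvMarkD L p).size = L.length := by
  simp [pvMarkD, PySem.Dict.size]

theorem pvCountP_update (L : List String) (p : String → Bool) (k : String)
    (hnd : L.Nodup) (hk : k ∈ L) (hpk : p k = false) :
    L.countP (fun r => if r = k then true else p r) = L.countP p + 1 := by
  induction L with
  | nil => cases hk
  | cons b L ih =>
    simp only [List.nodup_cons] at hnd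
    rw [List.countP_cons, List.countP_cons]
    rcases List.mem_cons.1 hk with rfl | h
    · have hcong : L.countP (fun r => if r = k then true else p r) = L.countP p := by
        apply List.countP_congr
        intro x hx
        have hx' : x ≠ k := fun e => hnd.1 (e ▸ hx)
        simp [hx']
      rw [hcong]
      simp [hpk]
    · have hbk : b ≠ k := fun e => hnd.1 (e ▸ h)
      rw [ih hnd.2 h]
      simp only [if_neg hbk]
      omega

theorem pvCountP_mono (L : List String) (p q : String → Bool)
    (h : ∀ r ∈ L, p r = true → q r = true) : L.countP p ≤ L.countP q := by
  induction L with
  | nil => simp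
  | cons a L ih =>
    rw [List.countP_cons, List.countP_cons]
    have h1 := ih (fun r hr => h r (by simp [hr]))
    by_cases hp : p a = true
    · simp [hp, h a (by simp) hp]; omega
    · simp only [Bool.not_eq_true] at hp
      simp [hp]
      split <;> omega

theorem pvCountP_eq_of_mono (L : List String) (p q : String → Bool)
    (h : ∀ r ∈ L, p r = true → q r = true) (hc : L.countP q = L.countP p) :
    ∀ r ∈ L, q r = p r := by
  induction L with
  | nil => simp
  | cons a L ih =>
    rw [List.countP_cons, List.countP_cons] at hc
    have htail_le := pvCountP_mono L p q (fun r hr => h r (by simp [hr]))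
    have hhead_le : (if p a = true then 1 else 0) ≤ (if q a = true then 1 else 0) := by
      by_cases hp : p a = true
      · simp [hp, h a (by simp) hp]
      · simp only [Bool.not_eq_true] at hp
        simp [hp]
    have htails : L.countP q = L.countP p := by omega
    have hheads : (if q a = true then 1 else 0) = (if p a = true then 1 else 0) := by omega
    intro r hr
    rcases List.mem_cons.1 hr with rfl | h1
    · by_cases hp : p r = true
      · rw [hp, h r (by simp) hp]
      · simp only [Bool.not_eq_true] at hp
        rw [hp] at hheads
        simp only [Bool.false_eq_true, if_false] at hheads
        by_cases hq : q r = true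
        · rw [hq] at hheads; simp at hheads
        · simp only [Bool.not_eq_true] at hq
          rw [hq, hp]
    · exact ih (fun x hx => h x (by simp [hx])) htails r h1

theorem pvFoldl_inl (B0 : PySem.Dict String Bool) (d tot r : Int) :
    ∀ ks : List String, ks.foldl (pvScanStep B0 d tot) (Sum.inl r) = Sum.inl r := by
  intro ks
  induction ks with
  | nil => rfl
  | cons k ks ih =>
    simp only [List.foldl_cons]
    rw [show pvScanStep B0 d tot (Sum.inl r) k = Sum.inl r from rfl, ih]

theorem pvScanStep_inr (blk : PySem.Dict String Bool) (d tot : Int)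
    (a : PySem.Dict String Bool) (cnt maxd : Int) (k : String) :
    pvScanStep blk d tot (Sum.inr (a, cnt, maxd)) k =
      (if (a.get? k).isNone then Sum.inr (a, cnt, maxd)
       else if blk.getD k false = false then Sum.inr (a, cnt, maxd)
       else if a.getD k false = true then Sum.inr (a, cnt, maxd)
       else if cnt + 1 = tot then Sum.inl (if d > maxd then d else maxd)
       else Sum.inr (a.insert k true, cnt + 1, if d > maxd then d else maxd)) := rfl

theorem pvAll_congr (L : List String) (f g : String → Bool)
    (h : ∀ r ∈ L, f r = g r) : L.all f = L.all g := by
  apply Bool.eq_iff_iff.2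
  simp only [List.all_eq_true]
  constructor
  · intro hh r hr; rw [← h r hr]; exact hh r hr
  · intro hh r hr; rw [h r hr]; exact hh r hr

theorem pvScanRhs_congr (L : List String) (d maxd : Int) (c : Nat) (f g : String → Bool)
    (h : ∀ r ∈ L, f r = g r) :
    (if L.all f then (Sum.inl d : Sum Int (PySem.Dict String Bool × Int × Int))
     else Sum.inr (pvMarkD L f, (L.countP f : Int), if L.countP f = c then maxd else d)) =
    (if L.all g then Sum.inl d
     else Sum.inr (pvMarkD L g, (L.countP g : Int), if L.countP g = c then maxd else d)) := by
  rw [pvAll_congr L f g h, pvMarkD_congr L f g h,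
      List.countP_congr (fun x hx => by rw [h x hx])]

theorem pvAll_false_of_exists (L : List String) (p : String → Bool)
    (h : ∃ r ∈ L, p r = false) : L.all p = false := by
  rcases h with ⟨r, hr, hpr⟩
  apply Bool.eq_false_iff.2
  simp only [ne_eq, List.all_eq_true, not_forall]
  exact ⟨r, by simp [hr, hpr]⟩

-- the inner key loop of pvLookScan, generalized over the key list being folded
theorem pvScanGo_spec (B0 : PySem.Dict String Bool) (d : Int) (L : List String)
    (hnd : L.Nodup) :
    ∀ (ks : List String) (p : String → Bool) (maxd : Int),
      maxd ≤ d → (∃ r ∈ L, p r = false) →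
      (ks.foldl (pvScanStep B0 d (L.length : Int))
        (Sum.inr (pvMarkD L p, (L.countP p : Int), maxd))) =
      (if L.all (fun r => p r || (ks.contains r && B0.getD r false)) then Sum.inl d
       else Sum.inr (pvMarkD L (fun r => p r || (ks.contains r && B0.getD r false)),
                     (L.countP (fun r => p r || (ks.contains r && B0.getD r false)) : Int),
                     if L.countP (fun r => p r || (ks.contains r && B0.getD r false)) = L.countP p
                     then maxd else d)) := by
  intro ks
  induction ks with
  | nil =>
    intro p maxd hmax hnf
    simp only [List.foldl_nil]
    rw [pvScanRhs_congr L d maxd (L.countP p) _ p (by intro r hr; simp)]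
    simp [pvAll_false_of_exists L p hnf]
  | cons k ks ih =>
    intro p maxd hmax hnf
    simp only [List.foldl_cons]
    by_cases hkL : k ∈ L
    · have hget : (pvMarkD L p).get? k = some (p k) := by rw [pvMarkD_get?]; simp [hkL]
      by_cases hB : B0.getD k false = true
      · by_cases hp : p k = true
        · have hgetD : (pvMarkD L p).getD k false = true := by
            rw [pvMarkD_getD]; simp [hkL, hp]
          have hstep : pvScanStep B0 d (L.length : Int)
              (Sum.inr (pvMarkD L p, (L.countP p : Int), maxd)) k =
              Sum.inr (pvMarkD L p, (L.countP p : Int), maxd) := by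
            rw [pvScanStep_inr, hget]
            simp only [Option.isNone_some, Bool.false_eq_true, if_false]
            rw [if_neg (by simp [hB]), if_pos hgetD]
          rw [hstep, ih p maxd hmax hnf]
          apply pvScanRhs_congr
          intro r hr
          by_cases hrk : r = k
          · subst hrk
            simp [hp]
          · simp [hrk]
        · simp only [Bool.not_eq_true] at hp
          have hgetD : (pvMarkD L p).getD k false = false := by
            rw [pvMarkD_getD]; simp [hp]
          have hins := pvMarkD_insert L p k hkL
          have hcnt := pvCountP_update L p k hnd hkL hp
          have hstep : pvScanStep B0 d (L.length : Int)
              (Sum.inr (pvMarkD L p, (L.countP p : Int), maxd)) k =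
              (if L.countP (fun r => if r = k then true else p r) = L.length
               then Sum.inl d
               else Sum.inr (pvMarkD L (fun r => if r = k then true else p r),
                      (L.countP (fun r => if r = k then true else p r) : Int), d)) := by
            rw [pvScanStep_inr, hget]
            simp only [Option.isNone_some, Bool.false_eq_true, if_false]
            rw [if_neg (by simp [hB]), if_neg (by simp [hgetD]), hins]
            have hmaxd' : (if d > maxd then d else maxd) = d := by
              by_cases h : d > maxd
              · simp [h]
              · simp only [if_neg h]; omega
            rw [hmaxd']
            by_cases hc : L.countP (fun r => if r = k then true else p r) = L.length
            · rw [if_pos (by rw [hcnt] at hc; omega), if_pos hc]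
            · rw [if_neg (by intro hh; apply hc; rw [hcnt]; omega), if_neg hc]
              rw [hcnt]
              push_cast
              ring_nf
          rw [hstep]
          by_cases hfull : L.countP (fun r => if r = k then true else p r) = L.length
          · rw [if_pos hfull]
            have hall : L.all (fun r => p r || ((k :: ks).contains r && B0.getD r false)) = true := by
              rw [List.all_eq_true]
              intro r hr
              have hq := (List.countP_eq_length).1 hfull r hr
              by_cases hrk : r = k
              · subst hrk
                simp [List.contains_cons, hB]
              · simp only [if_neg hrk] at hq
                simp [hq]
            rw [pvFoldl_inl, if_pos hall]
          · rw [if_neg hfull]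
            have hnf' : ∃ r ∈ L, (fun r => if r = k then true else p r) r = false := by
              by_contra hcon
              push_neg at hcon
              apply hfull
              rw [List.countP_eq_length]
              intro r hr
              by_cases hrk : r = k
              · simp [hrk]
              · simp only [if_neg hrk]
                have h3 := hcon r hr
                simp only [if_neg hrk, Bool.not_eq_false] at h3
                exact h3
            rw [ih _ d le_rfl hnf']
            have hfun : (fun r => (if r = k then true else p r) || (ks.contains r && B0.getD r false))
                = (fun r => p r || ((k :: ks).contains r && B0.getD r false)) := by
              funext r
              by_cases hrk : r = k
              · subst hrk; simp [List.contains_cons, hB]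
              · simp [hrk]
            rw [hfun]
            have h2 : L.countP (fun r => if r = k then true else p r) ≤
                L.countP (fun r => p r || ((k :: ks).contains r && B0.getD r false)) := by
              apply pvCountP_mono
              intro r hr h
              by_cases hrk : r = k
              · subst hrk; simp [List.contains_cons, hB]
              · simp only [if_neg hrk] at h; simp [h]
            by_cases hallp : L.all (fun r => p r || ((k :: ks).contains r && B0.getD r false)) = true
            · rw [if_pos hallp, if_pos hallp]
            · rw [if_neg hallp, if_neg hallp, ite_self, if_neg (by omega)]
      · simp only [Bool.not_eq_true] at hB
        have hstep : pvScanStep B0 d (L.length : Int)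
            (Sum.inr (pvMarkD L p, (L.countP p : Int), maxd)) k =
            Sum.inr (pvMarkD L p, (L.countP p : Int), maxd) := by
          rw [pvScanStep_inr, hget]
          simp only [Option.isNone_some, Bool.false_eq_true, if_false]
          rw [if_pos hB]
        rw [hstep, ih p maxd hmax hnf]
        apply pvScanRhs_congr
        intro r hr
        by_cases hrk : r = k
        · subst hrk; simp [hB]
        · simp [hrk]
    · have hget : (pvMarkD L p).get? k = none := by rw [pvMarkD_get?]; simp [hkL]
      have hstep : pvScanStep B0 d (L.length : Int)
          (Sum.inr (pvMarkD L p, (L.countP p : Int), maxd)) k =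
          Sum.inr (pvMarkD L p, (L.countP p : Int), maxd) := by
        rw [pvScanStep_inr, hget]
        simp
      rw [hstep, ih p maxd hmax hnf]
      apply pvScanRhs_congr
      intro r hr
      have hrk : r ≠ k := fun e => hkL (e ▸ hr)
      simp [hrk]

theorem pvScan_spec (B0 : PySem.Dict String Bool) (d : Int) (L : List String)
    (hnd : L.Nodup) (p : String → Bool) (maxd : Int)
    (hmax : maxd ≤ d) (hnf : ∃ r ∈ L, p r = false) :
    pvLookScan B0 d (L.length : Int) (pvMarkD L p, (L.countP p : Int), maxd) =
      (if L.all (fun r => p r || B0.getD r false) then Sum.inl d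
       else Sum.inr (pvMarkD L (fun r => p r || B0.getD r false),
                     (L.countP (fun r => p r || B0.getD r false) : Int),
                     if L.countP (fun r => p r || B0.getD r false) = L.countP p
                     then maxd else d)) := by
  unfold pvLookScan
  rw [pvScanGo_spec B0 d L hnd B0.keys p maxd hmax hnf]
  apply pvScanRhs_congr
  intro r hr
  by_cases hBr : B0.getD r false = true
  · have hmem : r ∈ B0.keys := by
      by_contra hc
      have hcontains : B0.contains r = false := by
        by_contra hc2
        simp only [Bool.not_eq_false] at hc2
        exact hc ((PySem.Dict.contains_iff_mem_keys B0 r).1 hc2)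
      rw [PySem.Dict.getD_of_not_contains B0 false hcontains] at hBr
      cases hBr
    simp [hBr, hmem]
  · simp only [Bool.not_eq_true] at hBr
    simp [hBr]

theorem pvOcc_eq_filter (blocks : List (List (String × Bool))) (req : String) :
    pvOcc blocks req = (PySem.List.pyRange 0 (blocks.length : Int) 1).filter (pvHas blocks req) := by
  unfold pvOcc
  rw [PySem.List.foldl_congr_mem _ _
    (fun acc j => if pvHas blocks req j then acc ++ [j] else acc) _
    (by
      intro acc x hx
      have hx0 : (0:Int) ≤ x := (PySem.List.mem_pyRange_one.1 hx).1
      simp [pvHas, hx0])]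
  rw [PySem.List.foldl_append_if_eq_filter (pvHas blocks req) _ []]
  simp

theorem pvHas_bounds (blocks : List (List (String × Bool))) (req : String) (j : Int)
    (h : pvHas blocks req j = true) : 0 ≤ j ∧ j < (blocks.length : Int) := by
  unfold pvHas at h
  rw [Bool.and_eq_true] at h
  have h0 : (0:Int) ≤ j := by simpa using h.1
  refine ⟨h0, ?_⟩
  by_contra hlt
  push_neg at hlt
  have hnone : PySem.List.pyGet? blocks j = none := by
    rw [← Int.toNat_of_nonneg h0, PySem.List.pyGet?_natCast]
    exact List.getElem?_eq_none (by omega)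
  rw [hnone] at h
  have h2 := h.2
  rw [PySem.Dict.getD_eq_get?_getD] at h2
  simp [PySem.Dict.get?] at h2

theorem pvMem_occ (blocks : List (List (String × Bool))) (req : String) (j : Int) :
    j ∈ pvOcc blocks req ↔ pvHas blocks req j = true := by
  rw [pvOcc_eq_filter]
  simp only [List.mem_filter, PySem.List.mem_pyRange_one]
  constructor
  · rintro ⟨-, h⟩; exact h
  · intro h; exact ⟨⟨(pvHas_bounds _ _ _ h).1, (pvHas_bounds _ _ _ h).2⟩, h⟩

theorem pvDR_attained (blocks : List (List (String × Bool))) (i : Int) (r : String)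
    (h : pvSat blocks r = true) :
    ∃ j, pvHas blocks r j = true ∧ pvDR blocks i r = ((i - j).natAbs : Int) := by
  unfold pvSat at h
  cases hocc : pvOcc blocks r with
  | nil => rw [hocc] at h; simp at h
  | cons o os =>
    have hdr : pvDR blocks i r =
        (os.map (fun j => ((i - j).natAbs : Int))).foldl min (((i - o).natAbs : Int)) := by
      unfold pvDR
      rw [hocc, List.map_cons]
    rcases PySem.List.foldl_min_mem (os.map (fun j => ((i - j).natAbs : Int)))
        (((i - o).natAbs : Int)) with he | he
    · exact ⟨o, (pvMem_occ _ _ _).1 (by rw [hocc]; simp), by rw [hdr, he]⟩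
    · rcases List.mem_map.1 he with ⟨j, hj, hje⟩
      exact ⟨j, (pvMem_occ _ _ _).1 (by rw [hocc]; simp [hj]), by rw [hdr, ← hje]⟩

theorem pvDR_le (blocks : List (List (String × Bool))) (i : Int) (r : String) (j : Int)
    (h : pvHas blocks r j = true) : pvDR blocks i r ≤ ((i - j).natAbs : Int) := by
  have hmem : j ∈ pvOcc blocks r := (pvMem_occ _ _ _).2 h
  cases hocc : pvOcc blocks r with
  | nil => rw [hocc] at hmem; cases hmem
  | cons o os =>
    have hdr : pvDR blocks i r =
        (os.map (fun j => ((i - j).natAbs : Int))).foldl min (((i - o).natAbs : Int)) := by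
      unfold pvDR
      rw [hocc, List.map_cons]
    rw [hocc] at hmem
    have hle := PySem.List.foldl_min_le (os.map (fun j => ((i - j).natAbs : Int)))
        (((i - o).natAbs : Int))
    rcases List.mem_cons.1 hmem with rfl | hin
    · rw [hdr]; exact hle.1
    · rw [hdr]; exact hle.2 _ (List.mem_map.2 ⟨j, hin, rfl⟩)

theorem pvDR_nonneg (blocks : List (List (String × Bool))) (i : Int) (r : String) :
    0 ≤ pvDR blocks i r := by
  cases hocc : pvOcc blocks r with
  | nil => unfold pvDR; rw [hocc]; simp
  | cons o os =>
    have hdr : pvDR blocks i r =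
        (os.map (fun j => ((i - j).natAbs : Int))).foldl min (((i - o).natAbs : Int)) := by
      unfold pvDR
      rw [hocc, List.map_cons]
    rcases PySem.List.foldl_min_mem (os.map (fun j => ((i - j).natAbs : Int)))
        (((i - o).natAbs : Int)) with he | he
    · rw [hdr, he]; positivity
    · rcases List.mem_map.1 he with ⟨j, _, hje⟩
      rw [hdr, ← hje]; positivity

theorem pvDR_lt_n (blocks : List (List (String × Bool))) (i : Int) (r : String)
    (hi0 : 0 ≤ i) (hin : i < (blocks.length : Int)) (h : pvSat blocks r = true) :
    pvDR blocks i r < (blocks.length : Int) := by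
  rcases pvDR_attained blocks i r h with ⟨j, hj, he⟩
  have hb := pvHas_bounds blocks r j hj
  rw [he]
  omega

-- one distance step of the "marked" predicate
theorem pvP_step (blocks : List (List (String × Bool))) (i d : Int) (r : String)
    (hd : 0 ≤ d) :
    pvP blocks i (d + 1) r = (pvP blocks i d r || pvHas blocks r (i - d) || pvHas blocks r (i + d)) := by
  unfold pvP
  by_cases hs : pvSat blocks r = true
  · have hnot : ∀ j, pvHas blocks r j = true → pvDR blocks i r ≤ ((i - j).natAbs : Int) :=
      fun j hj => pvDR_le blocks i r j hj
    rw [hs]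
    simp only [Bool.true_and]
    rcases pvDR_attained blocks i r hs with ⟨j0, hj0, he0⟩
    apply Bool.eq_iff_iff.2
    simp only [Bool.or_eq_true, decide_eq_true_eq]
    constructor
    · intro hlt
      by_cases hd' : pvDR blocks i r < d
      · exact Or.inl (Or.inl hd')
      · have heq : pvDR blocks i r = d := by omega
        have hb := pvHas_bounds blocks r j0 hj0
        have : j0 = i - d ∨ j0 = i + d := by
          rw [heq] at he0
          omega
        rcases this with rfl | rfl
        · exact Or.inl (Or.inr hj0)
        · exact Or.inr hj0
    · rintro ((hlt | hL) | hR)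
      · omega
      · have := hnot _ hL
        have hd' : ((i - (i - d)).natAbs : Int) = d := by omega
        omega
      · have := hnot _ hR
        have hd' : ((i - (i + d)).natAbs : Int) = d := by omega
        omega
  · simp only [Bool.not_eq_true] at hs
    rw [hs]
    simp only [Bool.false_and, Bool.false_or]
    have hnot : ∀ j, pvHas blocks r j = false := by
      intro j
      by_contra hj
      simp only [Bool.not_eq_false] at hj
      have : j ∈ pvOcc blocks r := (pvMem_occ _ _ _).2 hj
      unfold pvSat at hs
      rcases List.isEmpty_iff.1 (by simpa using hs) with h'
      rw [h'] at this
      cases this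
    rw [hnot, hnot]
    simp

-- pvMF equals d when every member is satisfiable with nearest ≤ d and some member attains d
theorem pvMF_eq_of_attained (blocks : List (List (String × Bool))) (L : List String)
    (i d : Int) (P : String → Bool) (hd : 0 ≤ d)
    (hall : ∀ r ∈ L, P r = true → pvDR blocks i r ≤ d)
    (hatt : ∃ r ∈ L, P r = true ∧ pvDR blocks i r = d) :
    pvMF blocks L i P = d := by
  unfold pvMF
  apply le_antisymm
  · exact pvFoldMax_le _ _ (-1) d (by omega)
      (fun r hr => hall r (List.mem_of_mem_filter hr) (List.of_mem_filter hr))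
  · rcases hatt with ⟨r, hr, hP, he⟩
    have := (PySem.List.le_foldl_max_int (L.filter P) (fun r => pvDR blocks i r) (-1)).2 r
      (List.mem_filter.2 ⟨hr, hP⟩)
    omega

theorem pvMF_le (blocks : List (List (String × Bool))) (L : List String) (i d : Int)
    (hd : -1 ≤ d) (h : ∀ r ∈ L, pvP blocks i (d + 1) r = true → pvDR blocks i r ≤ d) :
    pvMF blocks L i (pvP blocks i (d + 1)) ≤ d := by
  unfold pvMF
  apply pvFoldMax_le _ _ _ _ (by omega)
  intro r hr
  exact h r (List.mem_of_mem_filter hr) (List.of_mem_filter hr)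

theorem pvSat_of_has (blocks : List (List (String × Bool))) (r : String) (j : Int)
    (h : pvHas blocks r j = true) : pvSat blocks r = true := by
  have hmem : j ∈ pvOcc blocks r := (pvMem_occ _ _ _).2 h
  unfold pvSat
  cases hocc : pvOcc blocks r with
  | nil => rw [hocc] at hmem; cases hmem
  | cons o os => simp

-- left/right one-distance-step marking predicates and running maxima
def pvPL (blocks : List (List (String × Bool))) (i d0 : Int) : String → Bool :=
  fun r => pvP blocks i d0 r || pvHas blocks r (i - d0)

def pvPR (blocks : List (List (String × Bool))) (i d0 : Int) : String → Bool :=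
  fun r => pvPL blocks i d0 r || pvHas blocks r (i + d0)

def pvML (blocks : List (List (String × Bool))) (L : List String) (i d0 : Int) : Int :=
  if L.countP (pvPL blocks i d0) = L.countP (pvP blocks i d0)
  then pvMF blocks L i (pvP blocks i d0) else d0

def pvMR (blocks : List (List (String × Bool))) (L : List String) (i d0 : Int) : Int :=
  if L.countP (pvPR blocks i d0) = L.countP (pvPL blocks i d0)
  then pvML blocks L i d0 else d0

theorem pvLookGo_cons (i : Int) (blocks : List (List (String × Bool))) (tot d : Int)
    (ds : List Int) (s : PySem.Dict String Bool × Int × Int) :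
    pvLookGo i blocks tot (d :: ds) s =
      (match (if 0 ≤ i - d then
            pvLookScan (PySem.Dict.mk ((PySem.List.pyGet? blocks (i - d)).getD [])) d tot s
          else Sum.inr s) with
       | Sum.inl r => r
       | Sum.inr s1' =>
         (match (if i + d < (blocks.length : Int) then
              pvLookScan (PySem.Dict.mk ((PySem.List.pyGet? blocks (i + d)).getD [])) d tot s1'
            else Sum.inr s1') with
          | Sum.inl r => r
          | Sum.inr s2' => pvLookGo i blocks tot ds s2')) := rfl

-- the main run lemma: from the distance-d0 state, look's loop returns max-over-satisfiable
theorem pvLookGo_run (blocks : List (List (String × Bool))) (L : List String)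
    (hnd : L.Nodup) (i : Int) (hi0 : 0 ≤ i) (hin : i < (blocks.length : Int)) :
    ∀ (k : Nat) (d0 : Int), 0 ≤ d0 → d0 + k = (blocks.length : Int) →
      (∃ r ∈ L, pvP blocks i d0 r = false) →
      pvLookGo i blocks (L.length : Int) (PySem.List.pyRange d0 (blocks.length : Int) 1)
        (pvMarkD L (pvP blocks i d0), (L.countP (pvP blocks i d0) : Int),
         pvMF blocks L i (pvP blocks i d0)) =
      pvMF blocks L i (pvSat blocks) := by
  intro k
  induction k with
  | zero =>
    intro d0 hd0 hsum hnf
    have hrange : PySem.List.pyRange d0 (blocks.length : Int) 1 = [] :=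
      PySem.List.pyRange_one_eq_nil (by push_cast at hsum; omega)
    rw [hrange]
    show pvMF blocks L i (pvP blocks i d0) = pvMF blocks L i (pvSat blocks)
    unfold pvMF
    congr 1
    apply List.filter_congr
    intro r hr
    unfold pvP
    by_cases hs : pvSat blocks r = true
    · rw [hs]
      have hlt := pvDR_lt_n blocks i r hi0 hin hs
      have hd0n : (blocks.length : Int) = d0 := by push_cast at hsum; omega
      simp [show pvDR blocks i r < d0 by omega]
    · simp only [Bool.not_eq_true] at hs
      rw [hs]
      simp
  | succ k ih =>
    intro d0 hd0 hsum hnf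
    have hlen : d0 < (blocks.length : Int) := by push_cast at hsum; omega
    rw [PySem.List.pyRange_one_cons hlen, pvLookGo_cons]
    have hm0 : pvMF blocks L i (pvP blocks i d0) ≤ d0 - 1 := by
      have h := pvMF_le blocks L i (d0 - 1) (by omega) (by
        intro r hr hp
        rw [show d0 - 1 + 1 = d0 by ring] at hp
        unfold pvP at hp
        rw [Bool.and_eq_true] at hp
        have := of_decide_eq_true hp.2
        omega)
      rwa [show d0 - 1 + 1 = d0 by ring] at h
    have hscanL :
        (if 0 ≤ i - d0 then
            pvLookScan (PySem.Dict.mk ((PySem.List.pyGet? blocks (i - d0)).getD [])) d0 (L.length : Int)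
              (pvMarkD L (pvP blocks i d0), (L.countP (pvP blocks i d0) : Int),
               pvMF blocks L i (pvP blocks i d0))
          else Sum.inr (pvMarkD L (pvP blocks i d0), (L.countP (pvP blocks i d0) : Int),
               pvMF blocks L i (pvP blocks i d0))) =
        (if L.all (pvPL blocks i d0) then Sum.inl d0
         else Sum.inr (pvMarkD L (pvPL blocks i d0), (L.countP (pvPL blocks i d0) : Int),
              pvML blocks L i d0)) := by
      by_cases hg : 0 ≤ i - d0
      · rw [if_pos hg, pvScan_spec _ _ L hnd _ _ (by omega) hnf]
        have hfun : (fun r => pvP blocks i d0 r ||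
            (PySem.Dict.mk ((PySem.List.pyGet? blocks (i - d0)).getD [])).getD r false)
            = pvPL blocks i d0 := by
          funext r
          unfold pvPL pvHas
          rw [decide_eq_true hg]
          simp
        rw [hfun]
        unfold pvML
        rfl
      · rw [if_neg hg]
        have hfun : pvPL blocks i d0 = pvP blocks i d0 := by
          funext r
          unfold pvPL pvHas
          rw [decide_eq_false hg]
          simp
        rw [hfun, pvAll_false_of_exists L _ hnf]
        unfold pvML
        rw [hfun]
        simp
    rw [hscanL]
    have hboundL : ∀ r ∈ L, pvPL blocks i d0 r = true → pvDR blocks i r ≤ d0 := by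
      intro r hr h
      unfold pvPL at h
      rw [Bool.or_eq_true] at h
      rcases h with h1 | h2
      · unfold pvP at h1
        rw [Bool.and_eq_true] at h1
        have := of_decide_eq_true h1.2
        omega
      · have := pvDR_le blocks i r (i - d0) h2
        omega
    by_cases hfullL : L.all (pvPL blocks i d0) = true
    · rw [if_pos hfullL]
      show d0 = pvMF blocks L i (pvSat blocks)
      symm
      apply pvMF_eq_of_attained blocks L i d0 (pvSat blocks) (by omega)
      · intro r hr _
        exact hboundL r hr ((List.all_eq_true.1 hfullL) r hr)
      · rcases hnf with ⟨r0, hr0, hp0⟩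
        have hor := (List.all_eq_true.1 hfullL) r0 hr0
        unfold pvPL at hor
        rw [Bool.or_eq_true] at hor
        rcases hor with h1 | h2
        · rw [hp0] at h1; cases h1
        · have hsat : pvSat blocks r0 = true := pvSat_of_has blocks r0 (i - d0) h2
          have hle := pvDR_le blocks i r0 (i - d0) h2
          have hge : ¬ pvDR blocks i r0 < d0 := by
            intro hlt
            have : pvP blocks i d0 r0 = true := by
              unfold pvP
              rw [hsat]
              simp [hlt]
            rw [this] at hp0; cases hp0
          exact ⟨r0, hr0, hsat, by omega⟩
    · rw [if_neg hfullL]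
      have hnfL : ∃ r ∈ L, pvPL blocks i d0 r = false := by
        by_contra hcon
        push_neg at hcon
        exact hfullL (List.all_eq_true.2 (fun r hr => by
          have := hcon r hr
          simpa using this))
      have hmL : pvML blocks L i d0 ≤ d0 := by
        unfold pvML
        split
        · omega
        · omega
      show (match (if i + d0 < (blocks.length : Int) then
              pvLookScan (PySem.Dict.mk ((PySem.List.pyGet? blocks (i + d0)).getD [])) d0 (L.length : Int)
                (pvMarkD L (pvPL blocks i d0), (L.countP (pvPL blocks i d0) : Int), pvML blocks L i d0)
            else Sum.inr (pvMarkD L (pvPL blocks i d0), (L.countP (pvPL blocks i d0) : Int),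
                pvML blocks L i d0)) with
          | Sum.inl r => r
          | Sum.inr s2' => pvLookGo i blocks (L.length : Int)
              (PySem.List.pyRange (d0 + 1) (blocks.length : Int) 1) s2') =
        pvMF blocks L i (pvSat blocks)
      have hscanR :
          (if i + d0 < (blocks.length : Int) then
              pvLookScan (PySem.Dict.mk ((PySem.List.pyGet? blocks (i + d0)).getD [])) d0 (L.length : Int)
                (pvMarkD L (pvPL blocks i d0), (L.countP (pvPL blocks i d0) : Int), pvML blocks L i d0)
            else Sum.inr (pvMarkD L (pvPL blocks i d0), (L.countP (pvPL blocks i d0) : Int),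
                pvML blocks L i d0)) =
          (if L.all (pvPR blocks i d0) then Sum.inl d0
           else Sum.inr (pvMarkD L (pvPR blocks i d0), (L.countP (pvPR blocks i d0) : Int),
                pvMR blocks L i d0)) := by
        by_cases hg : i + d0 < (blocks.length : Int)
        · rw [if_pos hg, pvScan_spec _ _ L hnd _ _ hmL hnfL]
          have hfun : (fun r => pvPL blocks i d0 r ||
              (PySem.Dict.mk ((PySem.List.pyGet? blocks (i + d0)).getD [])).getD r false)
              = pvPR blocks i d0 := by
            funext r
            unfold pvPR pvHas
            rw [decide_eq_true (by omega : (0:Int) ≤ i + d0)]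
            simp
          rw [hfun]
          unfold pvMR
          rfl
        · rw [if_neg hg]
          have hfun : pvPR blocks i d0 = pvPL blocks i d0 := by
            funext r
            unfold pvPR
            have hhas : pvHas blocks r (i + d0) = false := by
              by_contra hcon
              simp only [Bool.not_eq_false] at hcon
              have := pvHas_bounds blocks r (i + d0) hcon
              omega
            rw [hhas]
            simp
          rw [hfun, pvAll_false_of_exists L _ hnfL]
          unfold pvMR
          rw [hfun]
          simp
      rw [hscanR]
      have hboundR : ∀ r ∈ L, pvPR blocks i d0 r = true → pvDR blocks i r ≤ d0 := by
        intro r hr h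
        unfold pvPR at h
        rw [Bool.or_eq_true] at h
        rcases h with h1 | h2
        · exact hboundL r hr h1
        · have := pvDR_le blocks i r (i + d0) h2
          omega
      by_cases hfullR : L.all (pvPR blocks i d0) = true
      · rw [if_pos hfullR]
        show d0 = pvMF blocks L i (pvSat blocks)
        symm
        apply pvMF_eq_of_attained blocks L i d0 (pvSat blocks) (by omega)
        · intro r hr _
          exact hboundR r hr ((List.all_eq_true.1 hfullR) r hr)
        · rcases hnfL with ⟨r0, hr0, hpL0⟩
          have hor := (List.all_eq_true.1 hfullR) r0 hr0
          unfold pvPR at hor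
          rw [Bool.or_eq_true] at hor
          rcases hor with h1 | h2
          · rw [hpL0] at h1; cases h1
          · have hsat : pvSat blocks r0 = true := pvSat_of_has blocks r0 (i + d0) h2
            have hle := pvDR_le blocks i r0 (i + d0) h2
            have hp0 : pvP blocks i d0 r0 = false := by
              unfold pvPL at hpL0
              rw [Bool.or_eq_false_iff] at hpL0
              exact hpL0.1
            have hge : ¬ pvDR blocks i r0 < d0 := by
              intro hlt
              have : pvP blocks i d0 r0 = true := by
                unfold pvP
                rw [hsat]
                simp [hlt]
              rw [this] at hp0; cases hp0
            exact ⟨r0, hr0, hsat, by omega⟩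
      · rw [if_neg hfullR]
        show pvLookGo i blocks (L.length : Int)
            (PySem.List.pyRange (d0 + 1) (blocks.length : Int) 1)
            (pvMarkD L (pvPR blocks i d0), (L.countP (pvPR blocks i d0) : Int),
             pvMR blocks L i d0) =
          pvMF blocks L i (pvSat blocks)
        have hstep_p : pvPR blocks i d0 = pvP blocks i (d0 + 1) := by
          funext r
          unfold pvPR pvPL
          exact (pvP_step blocks i d0 r hd0).symm
        have hmono1 : L.countP (pvP blocks i d0) ≤ L.countP (pvPL blocks i d0) :=
          pvCountP_mono _ _ _ (fun r hr h => by unfold pvPL; simp [h])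
        have hmono2 : L.countP (pvPL blocks i d0) ≤ L.countP (pvPR blocks i d0) :=
          pvCountP_mono _ _ _ (fun r hr h => by unfold pvPR; simp [h])
        have hMR : pvMR blocks L i d0 = pvMF blocks L i (pvP blocks i (d0 + 1)) := by
          rw [← hstep_p]
          by_cases hc : L.countP (pvPR blocks i d0) = L.countP (pvP blocks i d0)
          · have heq := pvCountP_eq_of_mono L (pvP blocks i d0) (pvPR blocks i d0)
              (fun r hr h => by unfold pvPR pvPL; simp [h]) hc
            have hMF : pvMF blocks L i (pvPR blocks i d0) = pvMF blocks L i (pvP blocks i d0) := by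
              unfold pvMF
              congr 1
              exact List.filter_congr (fun r hr => heq r hr)
            rw [hMF]
            unfold pvMR pvML
            rw [if_pos (by omega), if_pos (by omega)]
          · have hex : ∃ r ∈ L, pvPR blocks i d0 r = true ∧ pvP blocks i d0 r = false := by
              by_contra hcon
              push_neg at hcon
              apply hc
              apply List.countP_congr
              intro r hr
              constructor
              · intro h
                have := hcon r hr h
                simpa using this
              · intro h
                unfold pvPR pvPL
                simp [h]
            rcases hex with ⟨rs, hrs, hPRs, hP0s⟩
            have hor : pvHas blocks rs (i - d0) = true ∨ pvHas blocks rs (i + d0) = true := by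
              unfold pvPR pvPL at hPRs
              rw [hP0s] at hPRs
              simp only [Bool.false_or, Bool.or_eq_true] at hPRs
              exact hPRs
            have hsat : pvSat blocks rs = true := by
              rcases hor with h | h
              exacts [pvSat_of_has blocks rs _ h, pvSat_of_has blocks rs _ h]
            have hle : pvDR blocks i rs ≤ d0 := by
              rcases hor with h | h
              · have := pvDR_le blocks i rs (i - d0) h; omega
              · have := pvDR_le blocks i rs (i + d0) h; omega
            have hge : ¬ pvDR blocks i rs < d0 := by
              intro hlt
              have : pvP blocks i d0 rs = true := by
                unfold pvP
                rw [hsat]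
                simp [hlt]
              rw [this] at hP0s; cases hP0s
            have hMFd : pvMF blocks L i (pvPR blocks i d0) = d0 := by
              apply pvMF_eq_of_attained blocks L i d0 _ (by omega)
              · exact hboundR
              · exact ⟨rs, hrs, hPRs, by omega⟩
            rw [hMFd]
            unfold pvMR pvML
            by_cases hc2 : L.countP (pvPR blocks i d0) = L.countP (pvPL blocks i d0)
            · rw [if_pos hc2, if_neg (by omega)]
            · rw [if_neg hc2]
        have hnfR : ∃ r ∈ L, pvP blocks i (d0 + 1) r = false := by
          rw [← hstep_p]
          by_contra hcon
          push_neg at hcon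
          exact hfullR (List.all_eq_true.2 (fun r hr => by
            have := hcon r hr
            simpa using this))
        rw [hstep_p, hMR]
        exact ih (d0 + 1) (by omega) (by push_cast at hsum ⊢; omega) hnfR

-- degenerate case: empty requirement dict never marks anything
theorem pvLookGo_empty (blocks : List (List (String × Bool))) (i : Int) :
    ∀ (ds : List Int) (cnt maxd : Int),
      pvLookGo i blocks 0 ds (pvMarkD [] (fun _ => false), cnt, maxd) = maxd := by
  have hscanGo : ∀ (B0 : PySem.Dict String Bool) (d tot cnt maxd : Int) (ks : List String),
      ks.foldl (pvScanStep B0 d tot)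
        (Sum.inr (pvMarkD [] (fun _ => false), cnt, maxd)) =
      Sum.inr (pvMarkD [] (fun _ => false), cnt, maxd) := by
    intro B0 d tot cnt maxd ks
    induction ks with
    | nil => rfl
    | cons k ks ih =>
      simp only [List.foldl_cons]
      have hget : (pvMarkD [] (fun _ => false)).get? k = none := by rw [pvMarkD_get?]; simp
      rw [pvScanStep_inr, if_pos (show ((pvMarkD [] (fun _ => false)).get? k).isNone = true by
        rw [hget]; rfl)]
      exact ih
  intro ds
  induction ds with
  | nil =>
    intro cnt maxd
    rfl
  | cons e ds ih =>
    intro cnt maxd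
    rw [pvLookGo_cons]
    have hscan : ∀ j : Int,
        pvLookScan (PySem.Dict.mk ((PySem.List.pyGet? blocks j).getD [])) e 0
          (pvMarkD [] (fun _ => false), cnt, maxd) =
        Sum.inr (pvMarkD [] (fun _ => false), cnt, maxd) := by
      intro j
      unfold pvLookScan
      exact hscanGo _ e 0 cnt maxd _
    rw [hscan (i - e), ite_self]
    show (match (if i + e < (blocks.length : Int) then
          pvLookScan (PySem.Dict.mk ((PySem.List.pyGet? blocks (i + e)).getD [])) e 0
            (pvMarkD [] (fun _ => false), cnt, maxd)
        else Sum.inr (pvMarkD [] (fun _ => false), cnt, maxd)) with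
      | Sum.inl r => r
      | Sum.inr s2' => pvLookGo i blocks 0 ds s2') = maxd
    rw [hscan (i + e), ite_self]
    exact ih cnt maxd

-- A's requirement dict is pvMarkD (set reqs) false
theorem pvA0_eq (reqs : List String) :
    reqs.foldl (fun d r => d.insert r false) PySem.Dict.empty =
      pvMarkD (PySem.Set.ofList reqs) (fun _ => false) := by
  have hgo : ∀ (rs K : List String),
      rs.foldl (fun d r => d.insert r false) (pvMarkD K (fun _ => false)) =
      pvMarkD (rs.foldl PySem.Set.add K) (fun _ => false) := by
    intro rs
    induction rs with
    | nil => intro K; rfl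
    | cons r rs ih =>
      intro K
      simp only [List.foldl_cons]
      have hins : (pvMarkD K (fun _ => false)).insert r false =
          pvMarkD (PySem.Set.add K r) (fun _ => false) := by
        by_cases hK : r ∈ K
        · have hcont : (pvMarkD K (fun _ => false)).contains r = true := by
            rw [pvMarkD_contains]; simpa
          have hadd : PySem.Set.add K r = K := by
            simp [PySem.Set.add, PySem.Set.contains, hK]
          apply PySem.Dict.ext
          rw [PySem.Dict.items_insert_of_contains _ _ hcont, hadd]
          show List.map _ (K.map _) = K.map _
          rw [List.map_map]
          apply List.map_congr_left
          intro x hx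
          by_cases hxr : x = r
          · subst hxr; simp
          · simp [hxr]
        · have hcont : (pvMarkD K (fun _ => false)).contains r = false := by
            rw [pvMarkD_contains]; simpa
          have hadd : PySem.Set.add K r = K ++ [r] := by
            simp [PySem.Set.add, PySem.Set.contains, hK]
          apply PySem.Dict.ext
          rw [PySem.Dict.items_insert_of_not_contains _ _ hcont, hadd]
          simp [pvMarkD]
      rw [hins, ih]
  have h0 : PySem.Dict.empty = pvMarkD [] (fun _ => false) := rfl
  rw [h0, hgo, PySem.Set.ofList_eq_foldl]

-- B's value(i) is the same max-over-satisfiable fold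
theorem pvValue_eq (blocks : List (List (String × Bool))) (reqs : List String) (i : Int) :
    pvValue i (pvOccs blocks reqs) =
      pvMF blocks (PySem.Set.ofList reqs) i (pvSat blocks) := by
  unfold pvValue pvOccs
  rw [List.filter_map, List.foldl_map]
  rw [show ((fun occ => !List.isEmpty occ) ∘ (fun req => pvOcc blocks req)) = pvSat blocks from rfl]
  unfold pvMF
  apply PySem.List.foldl_congr_mem
  intro acc r hr
  have hsat : pvSat blocks r = true := List.of_mem_filter hr
  cases hocc : pvOcc blocks r with
  | nil =>
    unfold pvSat at hsat
    rw [hocc] at hsat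
    simp at hsat
  | cons o os =>
    show (if ((os.map (fun j => ((i - j).natAbs : Int))).foldl min (((i - o).natAbs : Int))) > acc
          then ((os.map (fun j => ((i - j).natAbs : Int))).foldl min (((i - o).natAbs : Int)))
          else acc) = max acc (pvDR blocks i r)
    have hdr : pvDR blocks i r =
        (os.map (fun j => ((i - j).natAbs : Int))).foldl min (((i - o).natAbs : Int)) := by
      unfold pvDR
      rw [hocc, List.map_cons]
    rw [← hdr]
    by_cases hgt : pvDR blocks i r > acc
    · rw [if_pos hgt, max_eq_right (le_of_lt hgt)]
    · rw [if_neg hgt, max_eq_left (by omega)]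

-- A's look equals B's value
theorem pvLook_eq (blocks : List (List (String × Bool))) (reqs : List String) (i : Int)
    (hi0 : 0 ≤ i) (hin : i < (blocks.length : Int)) :
    pvLook i (reqs.foldl (fun d r => d.insert r false) PySem.Dict.empty) blocks =
      pvValue i (pvOccs blocks reqs) := by
  rw [pvA0_eq]
  unfold pvLook
  rw [pvMarkD_size]
  by_cases hLnil : PySem.Set.ofList reqs = []
  · rw [hLnil]
    rw [show ((List.length ([] : List String) : Int)) = 0 by simp]
    rw [pvLookGo_empty blocks i _ 0 (-1)]
    rw [pvValue_eq, hLnil]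
    rfl
  · have hnd := PySem.Set.nodup_ofList reqs
    rcases List.exists_mem_of_ne_nil _ hLnil with ⟨r0, hr0⟩
    have hp0 : ∀ r ∈ PySem.Set.ofList reqs, pvP blocks i 0 r = false := by
      intro r hr
      unfold pvP
      have := pvDR_nonneg blocks i r
      simp [show ¬ pvDR blocks i r < 0 by omega]
    have h1 : pvMarkD (PySem.Set.ofList reqs) (fun _ => false) =
        pvMarkD (PySem.Set.ofList reqs) (pvP blocks i 0) :=
      pvMarkD_congr _ _ _ (fun r hr => (hp0 r hr).symm)
    have h2 : (0 : Int) = ((PySem.Set.ofList reqs).countP (pvP blocks i 0) : Int) := by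
      rw [List.countP_eq_zero.2 (fun r hr => by simp [hp0 r hr])]
      rfl
    have h3 : (-1 : Int) = pvMF blocks (PySem.Set.ofList reqs) i (pvP blocks i 0) := by
      unfold pvMF
      rw [List.filter_eq_nil_iff.2 (fun r hr => by simp [hp0 r hr])]
      rfl
    have hrun := pvLookGo_run blocks (PySem.Set.ofList reqs) hnd i hi0 hin blocks.length 0 le_rfl
      (by push_cast; ring) ⟨r0, hr0, hp0 r0 hr0⟩
    rw [← h1, ← h2, ← h3] at hrun
    rw [hrun, pvValue_eq]

-- the two argmin folds agree once a first value is in hand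
theorem pvArgmin_eq (g : Int → Int) :
    ∀ (ds : List Int) (b bi : Int),
      (ds.foldl (fun (st : Option Int × Int) i =>
        if (match st.1 with | none => true | some m => decide (g i < m)) then (some (g i), i)
        else st) (some b, bi)).2 =
      (ds.foldl (fun (st : Int × Int) j =>
        if g j < st.2 then (j, g j) else st) (bi, b)).1 := by
  intro ds
  induction ds with
  | nil => intro b bi; rfl
  | cons e ds ih =>
    intro b bi
    simp only [List.foldl_cons]
    by_cases h : g e < b
    · rw [if_pos (by simp [h] : (decide (g e < b)) = true), if_pos h]
      exact ih (g e) e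
    · rw [if_neg (by simp [h] : ¬ (decide (g e < b)) = true), if_neg h]
      exact ih b bi

-- ===== VERDICT (by name: the statement is the Claim_ definition above) =====
theorem apartment_hunting_n_n_spec : Claim_equal_apartment_hunting_n_n := by
  intro blocks reqs _
  unfold Spec_apartment_hunting_n_n
  unfold apartment_hunting_n_n apartment_hunting_n_n_alt
  by_cases hn : blocks.length = 0
  · rw [if_pos hn, hn]
    rw [show (PySem.List.pyRange 0 (((0:Nat) : Int)) 1) = [] from
      PySem.List.pyRange_one_eq_nil (by simp)]
    rfl
  · rw [if_neg hn]
    have hcong : (PySem.List.pyRange 0 (blocks.length : Int) 1).foldl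
        (fun (st : Option Int × Int) i =>
          let a := reqs.foldl (fun d r => d.insert r false) PySem.Dict.empty
          let distance := pvLook i a blocks
          if (match st.1 with | none => true | some m => distance < m) then (some distance, i)
          else st)
        (none, -1) =
        (PySem.List.pyRange 0 (blocks.length : Int) 1).foldl
        (fun (st : Option Int × Int) i =>
          if (match st.1 with | none => true | some m => decide (pvValue i (pvOccs blocks reqs) < m))
          then (some (pvValue i (pvOccs blocks reqs)), i) else st)
        (none, -1) := by
      apply PySem.List.foldl_congr_mem
      intro acc x hx
      have hb := PySem.List.mem_pyRange_one.1 hx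
      simp only [pvLook_eq blocks reqs x hb.1 hb.2]
    rw [hcong]
    have hpos : (0:Int) < (blocks.length : Int) := by
      have := Nat.pos_of_ne_zero hn
      exact_mod_cast this
    rw [PySem.List.pyRange_one_cons hpos, List.foldl_cons]
    exact pvArgmin_eq (fun i => pvValue i (pvOccs blocks reqs))
      (PySem.List.pyRange (0 + 1) (blocks.length : Int) 1)
      (pvValue 0 (pvOccs blocks reqs)) 0
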